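-- pv_equiv track=rewrite | github.com/DEVlimited/LFS-Data-Cleaners | demographics/clientByLocationAndPayer.py | process_client_by_location_and_payer
-- ===== SOURCE A (Python) =====
-- def process_client_by_location_and_payer(data):
--     """
--     Processes client data to group by location and then by payer, counting unique patients.
--     Args:
--         data (list): A list of dictionaries containing client information, where each dictionary
--                      has 'Location', 'Payor', and 'Patient' keys.
--     Returns:
--         dict: A nested dictionary with locations as keys, containing dictionaries of payors
--               with sets of unique patients.
--     """
--     location_payer_patients = {}  # Nested dict to track unique patients per location/payer
--
--     for row in data:
--         location = row.get('Location')
--         payor = row.get('Payor')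
--         patient = row.get('Patient')
--
--         # Skip rows without required fields
--         if not all([location, payor, patient]) or not all([location.strip(), payor.strip(), patient.strip()]):
--             continue
--
--         location = location.strip()
--         payor = payor.strip()
--         patient = patient.strip()
--
--         # Initialize nested structure if needed
--         if location not in location_payer_patients:
--             location_payer_patients[location] = {}
--
--         if payor not in location_payer_patients[location]:
--             location_payer_patients[location][payor] = set()
--
--         # Add patient to the set (automatically handles duplicates)
--         location_payer_patients[location][payor].add(patient)
--
--     return location_payer_patients
-- ===== SOURCE B (Python) =====
-- def _clean(row):
--     """Return the stripped (location, payor, patient) triple, or None for a row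
--     that fails the original truthiness/whitespace guard."""
--     location = row.get('Location')
--     payor = row.get('Payor')
--     patient = row.get('Patient')
--     if not (location and payor and patient):
--         return None
--     location, payor, patient = location.strip(), payor.strip(), patient.strip()
--     if not (location and payor and patient):
--         return None
--     return location, payor, patient
--
--
-- def process_client_by_location_and_payer(data):
--     # Pass 1: flat grouping under a composite (location, payor) key.
--     flat = {}
--     for row in data:
--         triple = _clean(row)
--         if triple is None:
--             continue
--         location, payor, patient = triple
--         flat.setdefault((location, payor), set()).add(patient)
--     # Pass 2: split the composite key back into the nested structure.
--     result = {}
--     for (location, payor), patients in flat.items():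
--         result.setdefault(location, {})[payor] = patients
--     return result
-- ===== Notes on version B (the rewrite author's own statement) =====
-- stated objective: alternative
-- what changed: A builds the nested location->payor->patients structure on the fly inside one loop; B first groups rows once under a flat composite (location, payor) key and then, in a separate pass, splits that key back into the two dict levels, extracting the row-cleaning guard into a helper.
import Mathlib
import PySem

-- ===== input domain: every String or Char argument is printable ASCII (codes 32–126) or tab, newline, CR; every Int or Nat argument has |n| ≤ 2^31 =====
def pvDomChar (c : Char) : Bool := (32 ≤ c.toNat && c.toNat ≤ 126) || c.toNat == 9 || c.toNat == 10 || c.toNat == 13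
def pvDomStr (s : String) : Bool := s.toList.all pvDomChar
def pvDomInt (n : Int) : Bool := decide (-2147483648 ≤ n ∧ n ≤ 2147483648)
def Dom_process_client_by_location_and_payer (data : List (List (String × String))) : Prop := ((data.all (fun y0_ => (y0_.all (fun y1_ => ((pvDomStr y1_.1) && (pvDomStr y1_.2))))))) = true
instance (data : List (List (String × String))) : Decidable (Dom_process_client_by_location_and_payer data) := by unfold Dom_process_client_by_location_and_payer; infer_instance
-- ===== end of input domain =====

-- B replaces A's on-the-fly nested grouping by a flat composite-key grouping pass plus a
-- second pass that splits the (location, payor) key back into the nested structure (objective: alternative).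

-- ===== PORT A =====
-- A's loop body: guard on truthiness and strip-nonemptiness, then nested dict/set update.
def pcAStep (d : PySem.Dict String (PySem.Dict String (PySem.Set String)))
    (row : List (String × String)) : PySem.Dict String (PySem.Dict String (PySem.Set String)) :=
  match (PySem.Dict.mk row).get? "Location", (PySem.Dict.mk row).get? "Payor", (PySem.Dict.mk row).get? "Patient" with
  | some location, some payor, some patient =>
    if !(!location.toList.isEmpty && !payor.toList.isEmpty && !patient.toList.isEmpty) ||
       !(!(PySem.Str.strip location).toList.isEmpty && !(PySem.Str.strip payor).toList.isEmpty &&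
         !(PySem.Str.strip patient).toList.isEmpty) then
      d
    else
      let location := PySem.Str.strip location
      let payor := PySem.Str.strip payor
      let patient := PySem.Str.strip patient
      let d1 := if d.contains location then d else d.insert location PySem.Dict.empty
      let inner := d1.getD location PySem.Dict.empty
      let inner1 := if inner.contains payor then inner else inner.insert payor PySem.Set.empty
      d1.insert location (inner1.insert payor (PySem.Set.add (inner1.getD payor PySem.Set.empty) patient))
  | _, _, _ => d

def process_client_by_location_and_payer (data : List (List (String × String))) :
    List (String × List (String × List String)) :=
  (data.foldl pcAStep PySem.Dict.empty).items.map (fun q => (q.1, q.2.items))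

-- ===== PORT B =====
-- B's _clean helper: the stripped triple, or none for a skipped row.
def pcClean (row : List (String × String)) : Option (String × String × String) :=
  match (PySem.Dict.mk row).get? "Location", (PySem.Dict.mk row).get? "Payor", (PySem.Dict.mk row).get? "Patient" with
  | some location, some payor, some patient =>
    if !(!location.toList.isEmpty && !payor.toList.isEmpty && !patient.toList.isEmpty) then none
    else
      let location := PySem.Str.strip location
      let payor := PySem.Str.strip payor
      let patient := PySem.Str.strip patient
      if !(!location.toList.isEmpty && !payor.toList.isEmpty && !patient.toList.isEmpty) then none
      else some (location, payor, patient)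
  | _, _, _ => none

-- B's first pass: flat.setdefault((location, payor), set()).add(patient)
def pcFlatStep (f : PySem.Dict (String × String) (PySem.Set String))
    (row : List (String × String)) : PySem.Dict (String × String) (PySem.Set String) :=
  match pcClean row with
  | none => f
  | some (location, payor, patient) =>
      f.modify (location, payor) PySem.Set.empty (fun s => PySem.Set.add s patient)

-- B's second pass body: result.setdefault(location, {})[payor] = patients
def pcNestStep (r : PySem.Dict String (PySem.Dict String (PySem.Set String)))
    (q : (String × String) × PySem.Set String) : PySem.Dict String (PySem.Dict String (PySem.Set String)) :=
  let r1 := r.setdefault q.1.1 PySem.Dict.empty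
  r1.insert q.1.1 ((r1.getD q.1.1 PySem.Dict.empty).insert q.1.2 q.2)

def process_client_by_location_and_payer_alt (data : List (List (String × String))) :
    List (String × List (String × List String)) :=
  let flat := data.foldl pcFlatStep PySem.Dict.empty
  let result := flat.items.foldl pcNestStep PySem.Dict.empty
  result.items.map (fun q => (q.1, q.2.items))

-- ===== PRECONDITION & SPEC =====
-- Pre_ excludes rows whose association list repeats one of the columns 'Location', 'Payor' or
-- 'Patient': such a list does not encode a Python dict (dict keys are unique), so those inputs do
-- not correspond to any input the Python function can receive.
def Pre_process_client_by_location_and_payer (data : List (List (String × String))) : Prop :=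
  (data.all (fun row => ((row.map Prod.fst).count "Location" ≤ 1 : Bool) &&
    ((row.map Prod.fst).count "Payor" ≤ 1 : Bool) &&
    ((row.map Prod.fst).count "Patient" ≤ 1 : Bool))) = true
instance (data : List (List (String × String))) : Decidable (Pre_process_client_by_location_and_payer data) := by unfold Pre_process_client_by_location_and_payer; infer_instance
def pvWitness_process_client_by_location_and_payer : (List (List (String × String))) :=
  [[("Location", "North"), ("Payor", "Acme"), ("Patient", "p1")],
   [("Location", " North "), ("Payor", "Acme"), ("Patient", "p2")],
   [("Location", "South"), ("Payor", ""), ("Patient", "p3")]]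
def Spec_process_client_by_location_and_payer (data : List (List (String × String))) (out : List (String × List (String × List String))) : Prop := out = process_client_by_location_and_payer_alt data
instance (data : List (List (String × String))) (out : List (String × List (String × List String))) : Decidable (Spec_process_client_by_location_and_payer data out) := by unfold Spec_process_client_by_location_and_payer; infer_instance

-- ===== CLAIM (what is proved, stated in full; the proofs are below) =====
def Claim_equal_process_client_by_location_and_payer : Prop := ∀ (data : List (List (String × String))), Dom_process_client_by_location_and_payer data → Pre_process_client_by_location_and_payer data → Spec_process_client_by_location_and_payer data (process_client_by_location_and_payer data)

-- ===== LEMMAS AND PROOFS =====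

-- The inner dict at location l that the flat items describe.
def pcInner (items : List ((String × String) × PySem.Set String)) (l : String) :
    PySem.Dict String (PySem.Set String) :=
  PySem.Dict.mk ((items.filter (fun q => q.1.1 == l)).map (fun q => (q.1.2, q.2)))

-- Invariant tying the flat dict to the nested dict.
def pcRel (f : PySem.Dict (String × String) (PySem.Set String))
    (d : PySem.Dict String (PySem.Dict String (PySem.Set String))) : Prop :=
  d.keys = PySem.Set.ofList (f.items.map (fun q => q.1.1)) ∧
  ∀ l, d.getD l PySem.Dict.empty = pcInner f.items l

-- The post-guard body of A's loop, on an already-cleaned triple.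
def pcADo (d : PySem.Dict String (PySem.Dict String (PySem.Set String)))
    (L P T : String) : PySem.Dict String (PySem.Dict String (PySem.Set String)) :=
  let d1 := if d.contains L then d else d.insert L PySem.Dict.empty
  let inner := d1.getD L PySem.Dict.empty
  let inner1 := if inner.contains P then inner else inner.insert P PySem.Set.empty
  d1.insert L (inner1.insert P (PySem.Set.add (inner1.getD P PySem.Set.empty) T))

lemma pcAStep_eq_clean (d : PySem.Dict String (PySem.Dict String (PySem.Set String)))
    (row : List (String × String)) :
    pcAStep d row = (match pcClean row with
      | none => d
      | some (L, P, T) => pcADo d L P T) := by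
  unfold pcAStep pcClean
  cases (PySem.Dict.mk row).get? "Location" with
  | none => rfl
  | some l =>
    cases (PySem.Dict.mk row).get? "Payor" with
    | none => rfl
    | some p =>
      cases (PySem.Dict.mk row).get? "Patient" with
      | none => rfl
      | some t =>
        cases hA : (!l.toList.isEmpty && !p.toList.isEmpty && !t.toList.isEmpty) with
        | false =>
          simp only [hA, Bool.not_false, Bool.true_or, if_true]
        | true =>
          cases hB : (!(PySem.Str.strip l).toList.isEmpty && !(PySem.Str.strip p).toList.isEmpty &&
              !(PySem.Str.strip t).toList.isEmpty) with
          | false =>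
            simp only [hA, hB, Bool.not_true, Bool.not_false, Bool.or_true, if_true]
            rfl
          | true =>
            simp only [hA, hB, Bool.not_true, Bool.or_self]
            rfl

lemma pcInner_get? (items : List ((String × String) × PySem.Set String)) (L P : String) :
    (pcInner items L).get? P = (PySem.Dict.mk items).get? (L, P) := by
  induction items with
  | nil => rfl
  | cons q t ih =>
    rw [PySem.Dict.get?_mk_cons]
    by_cases h1 : q.1.1 = L
    · by_cases h2 : q.1.2 = P
      · have : q.1 = (L, P) := Prod.ext h1 h2
        simp [pcInner, this, PySem.Dict.get?_mk_cons]
      · have hne : q.1 ≠ (L, P) := by intro h; exact h2 (by rw [h])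
        simpa [pcInner, List.filter_cons, h1, PySem.Dict.get?_mk_cons, h2, hne] using ih
    · have hne : q.1 ≠ (L, P) := by intro h; exact h1 (by rw [h])
      simpa [pcInner, List.filter_cons, h1, hne] using ih

lemma pcFirsts_replace (items : List ((String × String) × PySem.Set String))
    (k : String × String) (v : PySem.Set String) :
    (items.map (fun p => if p.1 == k then (k, v) else p)).map (fun q => q.1.1)
      = items.map (fun q => q.1.1) := by
  rw [List.map_map]
  apply List.map_congr_left
  intro p _
  by_cases h : p.1 = k
  · simp [h]
  · simp [h]

lemma pcFilter_replace (items : List ((String × String) × PySem.Set String))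
    (k : String × String) (v : PySem.Set String) (l : String) (h : l ≠ k.1) :
    (items.map (fun p => if p.1 == k then (k, v) else p)).filter (fun q => q.1.1 == l)
      = items.filter (fun q => q.1.1 == l) := by
  induction items with
  | nil => rfl
  | cons q t ih =>
    by_cases hq : q.1 = k
    · have : q.1.1 ≠ l := by rw [hq]; exact fun hh => h hh.symm
      simpa [List.filter_cons, hq, this, h.symm] using ih
    · by_cases hl : q.1.1 = l
      · simpa [List.filter_cons, hq, hl] using ih
      · simpa [List.filter_cons, hq, hl] using ih

lemma pcInner_replace (items : List ((String × String) × PySem.Set String))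
    (L P : String) (v : PySem.Set String) :
    pcInner (items.map (fun p => if p.1 == (L, P) then ((L, P), v) else p)) L
      = PySem.Dict.mk (((items.filter (fun q => q.1.1 == L)).map (fun q => (q.1.2, q.2))).map
          (fun p => if p.1 == P then (P, v) else p)) := by
  induction items with
  | nil => rfl
  | cons q t ih =>
    have ih' := congrArg PySem.Dict.items ih
    simp only [pcInner] at ih' ⊢
    by_cases hq : q.1 = (L, P)
    · simpa [List.filter_cons, hq] using ih'
    · by_cases hl : q.1.1 = L
      · have hp : q.1.2 ≠ P := fun hp => hq (Prod.ext hl hp)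
        simpa [List.filter_cons, hq, hl, hp] using ih'
      · simpa [List.filter_cons, hq, hl] using ih'

lemma pcFilter_of_not_mem (items : List ((String × String) × PySem.Set String)) (L : String)
    (h : L ∉ items.map (fun q => q.1.1)) :
    items.filter (fun q => q.1.1 == L) = [] := by
  rw [List.filter_eq_nil_iff]
  intro q hq
  simp only [List.mem_map] at h
  simpa using fun he => h ⟨q, hq, he⟩

-- One cleaned triple: flat update and A's nested update stay related.
lemma pcADo_rel (f : PySem.Dict (String × String) (PySem.Set String))
    (d : PySem.Dict String (PySem.Dict String (PySem.Set String))) (L P T : String)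
    (hrel : pcRel f d) (hnd : f.keys.Nodup) :
    pcRel (f.modify (L, P) PySem.Set.empty (fun s => PySem.Set.add s T)) (pcADo d L P T) ∧
    (f.modify (L, P) PySem.Set.empty (fun s => PySem.Set.add s T)).keys.Nodup := by
  obtain ⟨hk, hg⟩ := hrel
  have hmod : f.modify (L, P) PySem.Set.empty (fun s => PySem.Set.add s T)
      = f.insert (L, P) (PySem.Set.add (f.getD (L, P) PySem.Set.empty) T) := rfl
  have hInnerGet : ∀ P', (pcInner f.items L).get? P' = f.get? (L, P') := fun P' =>
    pcInner_get? f.items L P'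
  rw [hmod]
  by_cases hc : f.contains (L, P) = true
  · -- the (location, payor) pair was seen before
    obtain ⟨s, hs⟩ : ∃ s, f.get? (L, P) = some s := by
      rw [PySem.Dict.contains_eq_isSome_get?] at hc
      exact Option.isSome_iff_exists.mp hc
    have hsD : f.getD (L, P) PySem.Set.empty = s := PySem.Dict.getD_of_get?_eq_some f _ hs
    have hLmem : L ∈ f.items.map (fun q => q.1.1) := by
      exact List.mem_map.mpr ⟨((L, P), s), PySem.Dict.mem_items_of_get?_eq_some f hs, rfl⟩
    have hdL : d.contains L = true := by
      rw [PySem.Dict.contains_iff_mem_keys, hk, PySem.Set.mem_ofList]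
      exact hLmem
    have hinnerP : (d.getD L PySem.Dict.empty).contains P = true := by
      rw [hg L, PySem.Dict.contains_eq_isSome_get?, hInnerGet, hs]; rfl
    have hinnergD : (d.getD L PySem.Dict.empty).getD P PySem.Set.empty = s := by
      rw [hg L]; exact PySem.Dict.getD_of_get?_eq_some _ _ ((hInnerGet P).trans hs)
    unfold pcADo
    rw [hsD]
    simp only [hdL, if_true, hinnerP, hinnergD]
    have hitems := PySem.Dict.items_insert_of_contains f (PySem.Set.add s T) hc
    refine ⟨⟨?_, ?_⟩, ?_⟩
    · rw [PySem.Dict.keys_insert_of_contains d _ hdL, hk, hitems, pcFirsts_replace]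
    · intro l
      by_cases hl : l = L
      · subst hl
        rw [PySem.Dict.getD_insert_self]
        apply PySem.Dict.ext
        rw [hitems, congrArg PySem.Dict.items (pcInner_replace f.items l P (PySem.Set.add s T)),
          PySem.Dict.items_insert_of_contains _ _ hinnerP, hg l]
        rfl
      · rw [PySem.Dict.getD_insert_of_ne _ _ _ hl, hg l]
        unfold pcInner
        rw [hitems, pcFilter_replace f.items (L, P) _ l hl]
    · rw [PySem.Dict.keys_insert_of_contains f _ hc]; exact hnd
  · -- a fresh (location, payor) pair
    have hc' : f.contains (L, P) = false := by simpa using hc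
    have hsD : f.getD (L, P) PySem.Set.empty = PySem.Set.empty :=
      PySem.Dict.getD_of_not_contains f _ hc'
    have hget : f.get? (L, P) = none := by
      have := PySem.Dict.contains_eq_isSome_get? f (L, P)
      rw [hc'] at this
      exact Option.not_isSome_iff_eq_none.mp (by rw [← this]; simp)
    have hitems := PySem.Dict.items_insert_of_not_contains f
      (PySem.Set.add (f.getD (L, P) PySem.Set.empty) T) hc'
    have hkeys := PySem.Dict.keys_insert_of_not_contains f
      (PySem.Set.add (f.getD (L, P) PySem.Set.empty) T) hc'
    have hnd' : (f.insert (L, P) (PySem.Set.add (f.getD (L, P) PySem.Set.empty) T)).keys.Nodup := by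
      rw [hkeys]
      refine List.Nodup.append hnd (List.nodup_singleton _) ?_
      intro x hx hx'
      rw [List.mem_singleton] at hx'
      subst hx'
      exact absurd ((PySem.Dict.contains_iff_mem_keys f (L, P)).mpr hx) (by simp [hc'])
    have hinnerget : (d.getD L PySem.Dict.empty).get? P = none := by
      rw [hg L, hInnerGet, hget]
    have hinnerP : (d.getD L PySem.Dict.empty).contains P = false := by
      rw [PySem.Dict.contains_eq_isSome_get?, hinnerget]; rfl
    have hfirsts : (f.insert (L, P) (PySem.Set.add (f.getD (L, P) PySem.Set.empty) T)).items.map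
        (fun q => q.1.1) = f.items.map (fun q => q.1.1) ++ [L] := by
      rw [hitems]; simp
    refine ⟨⟨?_, ?_⟩, hnd'⟩
    · -- keys component
      rw [hfirsts, PySem.Set.ofList_append_singleton]
      unfold pcADo
      by_cases hdL : d.contains L = true
      · have hLmem : L ∈ f.items.map (fun q => q.1.1) := by
          have := (PySem.Dict.contains_iff_mem_keys d L).mp hdL
          rw [hk, PySem.Set.mem_ofList] at this
          exact this
        rw [PySem.Set.add_of_mem ((PySem.Set.mem_ofList _ _).mpr hLmem)]
        simp only [hdL, if_true]
        rw [PySem.Dict.keys_insert_of_contains d _ hdL, hk]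
      · have hdL' : d.contains L = false := by simpa using hdL
        have hLnmem : L ∉ f.items.map (fun q => q.1.1) := by
          intro hmem
          exact absurd ((PySem.Dict.contains_iff_mem_keys d L).mpr
            (by rw [hk, PySem.Set.mem_ofList]; exact hmem)) (by simp [hdL'])
        rw [PySem.Set.add_of_not_mem (fun hmem => hLnmem ((PySem.Set.mem_ofList _ _).mp hmem))]
        simp only [hdL', Bool.false_eq_true, if_false]
        rw [PySem.Dict.keys_insert_of_contains _ _
          (by rw [PySem.Dict.contains_iff_mem_keys]
              rw [PySem.Dict.keys_insert_of_not_contains d _ hdL']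
              simp),
          PySem.Dict.keys_insert_of_not_contains d _ hdL', hk]
    · -- inner component
      intro l
      unfold pcADo
      by_cases hl : l = L
      · subst hl
        by_cases hdL : d.contains l = true
        · simp only [hdL, if_true, hinnerP, Bool.false_eq_true, if_false]
          rw [PySem.Dict.getD_insert_self]
          have egd : ((d.getD l PySem.Dict.empty).insert P PySem.Set.empty).getD P PySem.Set.empty
              = PySem.Set.empty := PySem.Dict.getD_insert_self _ _ _ _
          rw [egd, PySem.Dict.insert_insert_self]
          apply PySem.Dict.ext
          rw [PySem.Dict.items_insert_of_not_contains _ _ hinnerP, hg l]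
          unfold pcInner
          rw [hitems, hsD]
          simp [List.filter_append]
        · have hdL' : d.contains l = false := by simpa using hdL
          have hLnmem : l ∉ f.items.map (fun q => q.1.1) := by
            intro hmem
            exact absurd ((PySem.Dict.contains_iff_mem_keys d l).mpr
              (by rw [hk, PySem.Set.mem_ofList]; exact hmem)) (by simp [hdL'])
          simp only [hdL', Bool.false_eq_true, if_false]
          rw [PySem.Dict.getD_insert_self]
          have hinner0 : ((d.insert l PySem.Dict.empty).getD l PySem.Dict.empty)
              = PySem.Dict.empty := PySem.Dict.getD_insert_self d l _ _
          rw [hinner0]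
          have hce : (PySem.Dict.empty : PySem.Dict String (PySem.Set String)).contains P
              = false := rfl
          have egd : ((PySem.Dict.empty : PySem.Dict String (PySem.Set String)).insert P
              PySem.Set.empty).getD P PySem.Set.empty = PySem.Set.empty :=
            PySem.Dict.getD_insert_self _ _ _ _
          simp only [hce, Bool.false_eq_true, if_false]
          rw [egd, PySem.Dict.insert_insert_self]
          apply PySem.Dict.ext
          rw [PySem.Dict.items_insert_of_not_contains _ _ hce]
          unfold pcInner
          rw [hitems, hsD, List.filter_append, pcFilter_of_not_mem f.items l hLnmem]
          simp [PySem.Dict.empty]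
      · by_cases hdL : d.contains L = true
        · simp only [hdL, if_true, hinnerP, Bool.false_eq_true, if_false]
          rw [PySem.Dict.getD_insert_of_ne _ _ _ hl, hg l]
          unfold pcInner
          rw [hitems]
          simp [List.filter_append, (Ne.symm hl : L ≠ l)]
        · have hdL' : d.contains L = false := by simpa using hdL
          simp only [hdL', Bool.false_eq_true, if_false]
          rw [PySem.Dict.getD_insert_of_ne _ _ _ hl, PySem.Dict.getD_insert_of_ne _ _ _ hl, hg l]
          unfold pcInner
          rw [hitems]
          simp [List.filter_append, (Ne.symm hl : L ≠ l)]

lemma pcFold_rel (data : List (List (String × String)))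
    (f : PySem.Dict (String × String) (PySem.Set String))
    (d : PySem.Dict String (PySem.Dict String (PySem.Set String)))
    (hrel : pcRel f d) (hnd : f.keys.Nodup) :
    pcRel (data.foldl pcFlatStep f) (data.foldl pcAStep d) ∧
    (data.foldl pcFlatStep f).keys.Nodup := by
  induction data generalizing f d with
  | nil => exact ⟨hrel, hnd⟩
  | cons row rest ih =>
    simp only [List.foldl_cons]
    rw [pcAStep_eq_clean]
    unfold pcFlatStep
    cases hc : pcClean row with
    | none => exact ih f d hrel hnd
    | some tr =>
      obtain ⟨L, P, T⟩ := tr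
      obtain ⟨h1, h2⟩ := pcADo_rel f d L P T hrel hnd
      exact ih _ _ h1 h2

-- B's second pass rebuilds exactly the nested dict the invariant describes.
lemma pcNest_rel (xs pre : List ((String × String) × PySem.Set String))
    (d : PySem.Dict String (PySem.Dict String (PySem.Set String)))
    (hrel : pcRel (PySem.Dict.mk pre) d)
    (hnd : ((pre ++ xs).map (fun q => q.1)).Nodup) :
    pcRel (PySem.Dict.mk (pre ++ xs)) (xs.foldl pcNestStep d) := by
  induction xs generalizing pre d with
  | nil => simpa using hrel
  | cons x t ih =>
    obtain ⟨⟨L, P⟩, s⟩ := x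
    obtain ⟨hk, hg⟩ := hrel
    have hfresh : (L, P) ∉ pre.map (fun q => q.1) := by
      rw [List.map_append, List.map_cons] at hnd
      intro hmem
      exact List.disjoint_of_nodup_append hnd hmem (List.mem_cons_self)
    have hgetpre : (PySem.Dict.mk pre).get? (L, P) = none := by
      rw [PySem.Dict.get?_eq_none_iff_not_mem_keys]
      exact hfresh
    have hinnerget : (d.getD L PySem.Dict.empty).get? P = none := by
      rw [hg L, pcInner_get?]
      exact hgetpre
    have hinnerP : (d.getD L PySem.Dict.empty).contains P = false := by
      rw [PySem.Dict.contains_eq_isSome_get?, hinnerget]; rfl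
    have hstep : pcRel (PySem.Dict.mk (pre ++ [((L, P), s)])) (pcNestStep d ((L, P), s)) := by
      unfold pcNestStep
      dsimp only
      by_cases hdL : d.contains L = true
      · rw [PySem.Dict.setdefault_of_contains d _ hdL]
        have hLmem : L ∈ pre.map (fun q => q.1.1) := by
          have := (PySem.Dict.contains_iff_mem_keys d L).mp hdL
          rw [hk, PySem.Set.mem_ofList] at this
          exact this
        constructor
        · rw [PySem.Dict.keys_insert_of_contains d _ hdL, hk]
          dsimp only
          simp only [List.map_append, List.map_cons, List.map_nil]
          rw [PySem.Set.ofList_append_singleton,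
            PySem.Set.add_of_mem ((PySem.Set.mem_ofList _ _).mpr hLmem)]
        · intro l
          by_cases hl : l = L
          · subst hl
            rw [PySem.Dict.getD_insert_self]
            apply PySem.Dict.ext
            rw [PySem.Dict.items_insert_of_not_contains _ _ hinnerP, hg l]
            unfold pcInner
            simp [List.filter_append]
          · rw [PySem.Dict.getD_insert_of_ne _ _ _ hl, hg l]
            unfold pcInner
            simp [List.filter_append, (Ne.symm hl : L ≠ l)]
      · have hdL' : d.contains L = false := by simpa using hdL
        have hLnmem : L ∉ pre.map (fun q => q.1.1) := by
          intro hmem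
          exact absurd ((PySem.Dict.contains_iff_mem_keys d L).mpr
            (by rw [hk, PySem.Set.mem_ofList]; exact hmem)) (by simp [hdL'])
        rw [PySem.Dict.setdefault_of_not_contains d _ hdL']
        have hgd : (d.insert L PySem.Dict.empty).getD L PySem.Dict.empty = PySem.Dict.empty :=
          PySem.Dict.getD_insert_self d L _ _
        rw [hgd, PySem.Dict.insert_insert_self]
        have hcemp : (PySem.Dict.empty : PySem.Dict String (PySem.Set String)).contains P
            = false := rfl
        constructor
        · rw [PySem.Dict.keys_insert_of_not_contains d _ hdL', hk]
          dsimp only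
          simp only [List.map_append, List.map_cons, List.map_nil]
          rw [PySem.Set.ofList_append_singleton,
            PySem.Set.add_of_not_mem (fun hmem => hLnmem ((PySem.Set.mem_ofList _ _).mp hmem))]
        · intro l
          by_cases hl : l = L
          · subst hl
            rw [PySem.Dict.getD_insert_self]
            apply PySem.Dict.ext
            rw [PySem.Dict.items_insert_of_not_contains _ _ hcemp]
            unfold pcInner
            rw [List.filter_append, pcFilter_of_not_mem pre l hLnmem]
            simp [PySem.Dict.empty]
          · rw [PySem.Dict.getD_insert_of_ne _ _ _ hl, hg l]
            unfold pcInner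
            simp [List.filter_append, (Ne.symm hl : L ≠ l)]
    have hassoc : pre ++ ((L, P), s) :: t = (pre ++ [((L, P), s)]) ++ t := by simp
    rw [List.foldl_cons, hassoc]
    exact ih (pre ++ [((L, P), s)]) (pcNestStep d ((L, P), s)) hstep (by rw [← hassoc]; exact hnd)

lemma pcRel_unique (f : PySem.Dict (String × String) (PySem.Set String))
    (d d' : PySem.Dict String (PySem.Dict String (PySem.Set String)))
    (h : pcRel f d) (h' : pcRel f d') : d = d' := by
  obtain ⟨hk, hg⟩ := h
  obtain ⟨hk', hg'⟩ := h'
  have hnd : d.keys.Nodup := by rw [hk]; exact PySem.Set.nodup_ofList _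
  have hnd' : d'.keys.Nodup := by rw [hk']; exact PySem.Set.nodup_ofList _
  apply PySem.Dict.ext
  rw [PySem.Dict.items_eq_map_keys d hnd PySem.Dict.empty,
      PySem.Dict.items_eq_map_keys d' hnd' PySem.Dict.empty, hk, hk']
  apply List.map_congr_left
  intro l _
  rw [hg l, hg' l]

-- ===== VERDICT (by name: the statement is the Claim_ definition above) =====
theorem process_client_by_location_and_payer_spec : Claim_equal_process_client_by_location_and_payer := by
  intro data _ _
  unfold Spec_process_client_by_location_and_payer
  unfold process_client_by_location_and_payer process_client_by_location_and_payer_alt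
  have hbase : pcRel PySem.Dict.empty PySem.Dict.empty := ⟨rfl, fun _ => rfl⟩
  obtain ⟨hrelA, hnd⟩ := pcFold_rel data PySem.Dict.empty PySem.Dict.empty hbase (by simp [PySem.Dict.keys, PySem.Dict.empty])
  set f := data.foldl pcFlatStep PySem.Dict.empty with hf
  have hrelB : pcRel f (f.items.foldl pcNestStep PySem.Dict.empty) := by
    have := pcNest_rel f.items [] PySem.Dict.empty ⟨rfl, fun _ => rfl⟩
      (by simpa [PySem.Dict.keys] using hnd)
    simpa using this
  have : data.foldl pcAStep PySem.Dict.empty = f.items.foldl pcNestStep PySem.Dict.empty :=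
    pcRel_unique f _ _ hrelA hrelB
  simp [this]
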